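-- pv_equiv track=rewrite | github.com/TaewoongMoon/hanghae99algorithm | 20210318.py | making_colored_paper
-- ===== SOURCE A (Python) =====
-- def making_colored_paper(n, cp, x, y):
--     if n == 1:
--         return cp[x][y]
--
--     cp1 = making_colored_paper(n // 2, cp, x, y)
--     cp2 = making_colored_paper(n // 2, cp, x, y + n // 2)
--     cp3 = making_colored_paper(n // 2, cp, x + n // 2, y)
--     cp4 = making_colored_paper(n // 2, cp, x + n // 2, y + n // 2)
--
--     if cp1 == cp2 == cp3 == cp4 and len(cp1) == 1:
--         return cp1
--
--     return f'({cp1}{cp2}{cp3}{cp4})'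
-- ===== SOURCE B (Python) =====
-- def making_colored_paper(n, cp, x, y):
--     if n == 1:
--         return cp[x][y]
--     # a region collapses to a single color: one character, equal at every cell
--     color = cp[x][y]
--     if len(color) == 1 and all(cp[x + i][y + j] == color
--                                for i in range(n) for j in range(n)):
--         return color
--     h = n // 2
--     return '({}{}{}{})'.format(
--         making_colored_paper(h, cp, x, y),
--         making_colored_paper(h, cp, x, y + h),
--         making_colored_paper(h, cp, x + h, y),
--         making_colored_paper(h, cp, x + h, y + h))
-- ===== Notes on version B (the rewrite author's own statement) =====
-- stated objective: alternative
-- what changed: B tests the whole n x n region for uniformity (one single-character color everywhere) before recursing, instead of A's rule of recursing first and merging four equal length-1 child encodings; Pre_ restricts to power-of-two n (the quadtree's natural domain) because for other n A's sparse recursion revisits and skips cells and its value there is an accident of the decomposition.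
-- outside the precondition, e.g. on making_colored_paper(3, [['a', 'a', 'b'], ['a', 'a', 'b'], ['b', 'b', 'b']], 0, 0): A returns 'a', B returns '(aaaa)'
import Mathlib
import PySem

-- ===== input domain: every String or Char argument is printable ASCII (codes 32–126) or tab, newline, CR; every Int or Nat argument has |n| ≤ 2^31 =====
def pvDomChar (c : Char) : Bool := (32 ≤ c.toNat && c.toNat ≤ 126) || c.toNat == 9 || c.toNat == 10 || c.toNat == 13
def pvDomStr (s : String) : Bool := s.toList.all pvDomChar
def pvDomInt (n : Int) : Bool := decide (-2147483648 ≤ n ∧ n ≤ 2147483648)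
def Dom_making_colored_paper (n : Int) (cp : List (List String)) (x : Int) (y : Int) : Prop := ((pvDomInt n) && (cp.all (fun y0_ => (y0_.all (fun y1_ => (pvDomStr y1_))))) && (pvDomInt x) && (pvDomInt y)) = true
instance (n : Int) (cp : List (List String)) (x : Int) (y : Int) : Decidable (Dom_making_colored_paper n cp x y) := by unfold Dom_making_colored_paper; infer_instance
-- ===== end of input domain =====

-- B decides collapsing by a direct uniformity scan of the whole region (one single-character color
-- at every cell) instead of A's rule of recursing first and merging equal length-1 child encodings
-- ("alternative"); Pre_ restricts to power-of-two n, the quadtree's natural domain.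


-- shared helper: Python's cp[x][y] (negative wraparound via pyGet?); the getD defaults are only
-- reached where Python raises IndexError, which Pre_ excludes
def mcpCell (cp : List (List String)) (x : Int) (y : Int) : String :=
  (PySem.List.pyGet? ((PySem.List.pyGet? cp x).getD []) y).getD ""

-- termination measure for the halving recursion (cited by name in decreasing_by)
theorem mcpHalfLt (n : Int) (h : ¬ n ≤ 1) : (PySem.Int.floordiv n 2).toNat < n.toNat := by
  have : PySem.Int.floordiv n 2 = n / 2 := PySem.Int.floordiv_eq_ediv_of_pos (by omega)
  simp only [this]; omega

-- ===== PORT A =====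
def making_colored_paper (n : Int) (cp : List (List String)) (x : Int) (y : Int) : String :=
  if _h1 : n = 1 then mcpCell cp x y
  else if _h0 : n ≤ 1 then ""  -- Python diverges for n ≤ 0 (RecursionError); outside Pre_
  else
    let h := PySem.Int.floordiv n 2
    let cp1 := making_colored_paper h cp x y
    let cp2 := making_colored_paper h cp x (y + h)
    let cp3 := making_colored_paper h cp (x + h) y
    let cp4 := making_colored_paper h cp (x + h) (y + h)
    if cp1 = cp2 ∧ cp2 = cp3 ∧ cp3 = cp4 ∧ PySem.Str.len cp1 = 1 then cp1
    else "(" ++ cp1 ++ cp2 ++ cp3 ++ cp4 ++ ")"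
termination_by n.toNat
decreasing_by all_goals exact mcpHalfLt n _h0

-- ===== PORT B =====
def making_colored_paper_alt (n : Int) (cp : List (List String)) (x : Int) (y : Int) : String :=
  if _h1 : n = 1 then mcpCell cp x y
  else if _h0 : n ≤ 1 then ""  -- Python diverges for n ≤ 0; outside Pre_
  else
    let color := mcpCell cp x y
    if PySem.Str.len color = 1 ∧
        (PySem.List.pyRange 0 n 1).all (fun i =>
          (PySem.List.pyRange 0 n 1).all (fun j => mcpCell cp (x + i) (y + j) == color)) then
      color
    else
      let h := PySem.Int.floordiv n 2
      "(" ++ making_colored_paper_alt h cp x y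
          ++ making_colored_paper_alt h cp x (y + h)
          ++ making_colored_paper_alt h cp (x + h) y
          ++ making_colored_paper_alt h cp (x + h) (y + h) ++ ")"
termination_by n.toNat
decreasing_by all_goals exact mcpHalfLt n _h0

-- ===== PRECONDITION & SPEC =====
-- Pre_ excludes n ≤ 0 (A recurses forever), any unreadable cell of the n×n block (IndexError,
-- stated as interval bounds on the row indices and, for each touched row — with Python's negative
-- wraparound — on the column indices), and — a stated narrowing — non-power-of-two n, on which A
-- still returns: there A's recursion revisits some cells and skips others, so its value is an
-- accident of the sparse decomposition and the quadtree encoding is not meaningfully defined.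
def mcpPow2s : List Int := [1, 2, 4, 8, 16, 32, 64, 128, 256, 512, 1024, 2048, 4096, 8192, 16384, 32768, 65536, 131072, 262144, 524288, 1048576, 2097152, 4194304, 8388608, 16777216, 33554432, 67108864, 134217728, 268435456, 536870912, 1073741824, 2147483648]

def Pre_making_colored_paper (n : Int) (cp : List (List String)) (x : Int) (y : Int) : Prop :=
  n ∈ mcpPow2s ∧
  (-(cp.length : Int) ≤ x ∧ x + n ≤ (cp.length : Int)) ∧
  ∀ k : ℕ, k < cp.length →
    ((x ≤ (k : Int) ∧ (k : Int) < x + n) ∨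
     (x ≤ (k : Int) - (cp.length : Int) ∧ (k : Int) - (cp.length : Int) < x + n)) →
    (-(((cp[k]?.getD []).length : Int)) ≤ y ∧ y + n ≤ ((cp[k]?.getD []).length : Int))
instance (n : Int) (cp : List (List String)) (x : Int) (y : Int) : Decidable (Pre_making_colored_paper n cp x y) := by unfold Pre_making_colored_paper; infer_instance

def pvWitness_making_colored_paper : Int × List (List String) × Int × Int :=
  (2, [["a", "b"], ["c", "a"]], 0, 0)

def Spec_making_colored_paper (n : Int) (cp : List (List String)) (x : Int) (y : Int) (out : String) : Prop := out = making_colored_paper_alt n cp x y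
instance (n : Int) (cp : List (List String)) (x : Int) (y : Int) (out : String) : Decidable (Spec_making_colored_paper n cp x y out) := by unfold Spec_making_colored_paper; infer_instance

-- ===== CLAIM (what is proved, stated in full; the proofs are below) =====
def Claim_equal_making_colored_paper : Prop := ∀ (n : Int) (cp : List (List String)) (x : Int) (y : Int), Dom_making_colored_paper n cp x y → Pre_making_colored_paper n cp x y → Spec_making_colored_paper n cp x y (making_colored_paper n cp x y)

-- ===== LEMMAS AND PROOFS =====

theorem mcpHalf (n : Int) : PySem.Int.floordiv n 2 = n / 2 :=
  PySem.Int.floordiv_eq_ediv_of_pos (by omega)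

-- power-of-two sizes, as used by the recursion
def mcpPow2 (n : Int) : Prop := ∃ k : ℕ, n = 2 ^ k

theorem mcpPow2_of_mem {n : Int} (h : n ∈ mcpPow2s) : mcpPow2 n := by
  fin_cases h
  · exact ⟨0, by norm_num⟩
  · exact ⟨1, by norm_num⟩
  · exact ⟨2, by norm_num⟩
  · exact ⟨3, by norm_num⟩
  · exact ⟨4, by norm_num⟩
  · exact ⟨5, by norm_num⟩
  · exact ⟨6, by norm_num⟩
  · exact ⟨7, by norm_num⟩
  · exact ⟨8, by norm_num⟩
  · exact ⟨9, by norm_num⟩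
  · exact ⟨10, by norm_num⟩
  · exact ⟨11, by norm_num⟩
  · exact ⟨12, by norm_num⟩
  · exact ⟨13, by norm_num⟩
  · exact ⟨14, by norm_num⟩
  · exact ⟨15, by norm_num⟩
  · exact ⟨16, by norm_num⟩
  · exact ⟨17, by norm_num⟩
  · exact ⟨18, by norm_num⟩
  · exact ⟨19, by norm_num⟩
  · exact ⟨20, by norm_num⟩
  · exact ⟨21, by norm_num⟩
  · exact ⟨22, by norm_num⟩
  · exact ⟨23, by norm_num⟩
  · exact ⟨24, by norm_num⟩
  · exact ⟨25, by norm_num⟩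
  · exact ⟨26, by norm_num⟩
  · exact ⟨27, by norm_num⟩
  · exact ⟨28, by norm_num⟩
  · exact ⟨29, by norm_num⟩
  · exact ⟨30, by norm_num⟩
  · exact ⟨31, by norm_num⟩

theorem mcpPow2_half {n : Int} (h : mcpPow2 n) (hn : 2 ≤ n) :
    mcpPow2 (n / 2) ∧ n = 2 * (n / 2) := by
  obtain ⟨k, rfl⟩ := h
  cases k with
  | zero => norm_num at hn
  | succ m =>
    constructor
    · exact ⟨m, by rw [pow_succ]; omega⟩
    · rw [pow_succ]; omega

-- the sub-region at (x, y) holds one value at every cell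
def mcpUniform (cp : List (List String)) (n : Int) (x : Int) (y : Int) : Prop :=
  ∀ i, 0 ≤ i → i < n → ∀ j, 0 ≤ j → j < n → mcpCell cp (x + i) (y + j) = mcpCell cp x y

-- uniformity of a doubled region splits into uniformity of the four quadrants with equal corners
theorem mcpUniform_split (cp : List (List String)) {n m : Int} (hm : 1 ≤ m) (hnm : n = 2 * m)
    (x y : Int) :
    mcpUniform cp n x y ↔
      (mcpUniform cp m x y ∧ mcpUniform cp m x (y + m) ∧
       mcpUniform cp m (x + m) y ∧ mcpUniform cp m (x + m) (y + m) ∧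
       mcpCell cp x (y + m) = mcpCell cp x y ∧
       mcpCell cp (x + m) y = mcpCell cp x y ∧
       mcpCell cp (x + m) (y + m) = mcpCell cp x y) := by
  subst hnm
  constructor
  · intro hu
    have key : ∀ a b : Int, 0 ≤ a → a ≤ m → 0 ≤ b → b ≤ m →
        ∀ i, 0 ≤ i → i < m → ∀ j, 0 ≤ j → j < m →
          mcpCell cp (x + a + i) (y + b + j) = mcpCell cp x y := by
      intro a b ha1 ha2 hb1 hb2 i hi1 hi2 j hj1 hj2
      have := hu (a + i) (by omega) (by omega) (b + j) (by omega) (by omega)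
      have e1 : x + (a + i) = x + a + i := by ring
      have e2 : y + (b + j) = y + b + j := by ring
      rwa [e1, e2] at this
    have corner : ∀ a b : Int, 0 ≤ a → a ≤ m → 0 ≤ b → b ≤ m →
        mcpCell cp (x + a) (y + b) = mcpCell cp x y := by
      intro a b ha1 ha2 hb1 hb2
      have := key a b ha1 ha2 hb1 hb2 0 le_rfl hm 0 le_rfl hm
      simpa using this
    have quad : ∀ a b : Int, 0 ≤ a → a ≤ m → 0 ≤ b → b ≤ m →
        mcpUniform cp m (x + a) (y + b) := by
      intro a b ha1 ha2 hb1 hb2 i hi1 hi2 j hj1 hj2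
      rw [key a b ha1 ha2 hb1 hb2 i hi1 hi2 j hj1 hj2, corner a b ha1 ha2 hb1 hb2]
    refine ⟨?_, ?_, ?_, ?_, ?_, ?_, ?_⟩
    · simpa using quad 0 0 (by omega) (by omega) (by omega) (by omega)
    · simpa using quad 0 m (by omega) (by omega) (by omega) (by omega)
    · simpa using quad m 0 (by omega) (by omega) (by omega) (by omega)
    · simpa using quad m m (by omega) (by omega) (by omega) (by omega)
    · simpa using corner 0 m (by omega) (by omega) (by omega) (by omega)
    · simpa using corner m 0 (by omega) (by omega) (by omega) (by omega)
    · simpa using corner m m (by omega) (by omega) (by omega) (by omega)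
  · rintro ⟨h1, h2, h3, h4, e2, e3, e4⟩ i hi1 hi2 j hj1 hj2
    by_cases hi : i < m <;> by_cases hj : j < m
    · exact h1 i hi1 hi j hj1 hj
    · have := h2 i hi1 hi (j - m) (by omega) (by omega)
      have e : y + m + (j - m) = y + j := by ring
      rw [e, e2] at this; exact this
    · have := h3 (i - m) (by omega) (by omega) j hj1 hj
      have e : x + m + (i - m) = x + i := by ring
      rw [e, e3] at this; exact this
    · have := h4 (i - m) (by omega) (by omega) (j - m) (by omega) (by omega)
      have e : x + m + (i - m) = x + i := by ring
      have e' : y + m + (j - m) = y + j := by ring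
      rw [e, e', e4] at this; exact this

theorem a_step {n : Int} (hn : 2 ≤ n) (cp : List (List String)) (x y : Int) :
    making_colored_paper n cp x y =
      (if making_colored_paper (PySem.Int.floordiv n 2) cp x y = making_colored_paper (PySem.Int.floordiv n 2) cp x (y + PySem.Int.floordiv n 2) ∧
          making_colored_paper (PySem.Int.floordiv n 2) cp x (y + PySem.Int.floordiv n 2) = making_colored_paper (PySem.Int.floordiv n 2) cp (x + PySem.Int.floordiv n 2) y ∧
          making_colored_paper (PySem.Int.floordiv n 2) cp (x + PySem.Int.floordiv n 2) y = making_colored_paper (PySem.Int.floordiv n 2) cp (x + PySem.Int.floordiv n 2) (y + PySem.Int.floordiv n 2) ∧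
          PySem.Str.len (making_colored_paper (PySem.Int.floordiv n 2) cp x y) = 1
       then making_colored_paper (PySem.Int.floordiv n 2) cp x y
       else "(" ++ making_colored_paper (PySem.Int.floordiv n 2) cp x y
               ++ making_colored_paper (PySem.Int.floordiv n 2) cp x (y + PySem.Int.floordiv n 2)
               ++ making_colored_paper (PySem.Int.floordiv n 2) cp (x + PySem.Int.floordiv n 2) y
               ++ making_colored_paper (PySem.Int.floordiv n 2) cp (x + PySem.Int.floordiv n 2) (y + PySem.Int.floordiv n 2) ++ ")") := by
  rw [making_colored_paper]
  rw [dif_neg (by omega : ¬ n = 1), dif_neg (by omega : ¬ n ≤ 1)]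

theorem alt_step {n : Int} (hn : 2 ≤ n) (cp : List (List String)) (x y : Int) :
    making_colored_paper_alt n cp x y =
      (if PySem.Str.len (mcpCell cp x y) = 1 ∧
          (PySem.List.pyRange 0 n 1).all (fun i =>
            (PySem.List.pyRange 0 n 1).all (fun j => mcpCell cp (x + i) (y + j) == mcpCell cp x y))
       then mcpCell cp x y
       else "(" ++ making_colored_paper_alt (PySem.Int.floordiv n 2) cp x y
               ++ making_colored_paper_alt (PySem.Int.floordiv n 2) cp x (y + PySem.Int.floordiv n 2)
               ++ making_colored_paper_alt (PySem.Int.floordiv n 2) cp (x + PySem.Int.floordiv n 2) y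
               ++ making_colored_paper_alt (PySem.Int.floordiv n 2) cp (x + PySem.Int.floordiv n 2) (y + PySem.Int.floordiv n 2) ++ ")") := by
  rw [making_colored_paper_alt]
  rw [dif_neg (by omega : ¬ n = 1), dif_neg (by omega : ¬ n ≤ 1)]

theorem alt_cond_iff (n : Int) (cp : List (List String)) (x y : Int) :
    (PySem.Str.len (mcpCell cp x y) = 1 ∧
      (PySem.List.pyRange 0 n 1).all (fun i =>
        (PySem.List.pyRange 0 n 1).all (fun j => mcpCell cp (x + i) (y + j) == mcpCell cp x y))) ↔
    (PySem.Str.len (mcpCell cp x y) = 1 ∧ mcpUniform cp n x y) := by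
  simp [mcpUniform, List.all_eq_true, PySem.List.mem_pyRange_one]

theorem paren_len_ne_one (a b c d : String) :
    PySem.Str.len ("(" ++ a ++ b ++ c ++ d ++ ")") ≠ 1 := by
  simp
  omega

-- characterisation of B: its result is a length-1 string exactly on uniform single-char regions,
-- and there it is the corner cell
theorem alt_char (n : Int) (cp : List (List String)) (x y : Int) (hn : 1 ≤ n) :
    (PySem.Str.len (making_colored_paper_alt n cp x y) = 1 ↔
      (PySem.Str.len (mcpCell cp x y) = 1 ∧ mcpUniform cp n x y)) ∧
    ((PySem.Str.len (mcpCell cp x y) = 1 ∧ mcpUniform cp n x y) →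
      making_colored_paper_alt n cp x y = mcpCell cp x y) := by
  by_cases h1 : n = 1
  · subst h1
    have hbase : making_colored_paper_alt 1 cp x y = mcpCell cp x y := by
      rw [making_colored_paper_alt, dif_pos rfl]
    have huni : mcpUniform cp 1 x y := by
      intro i hi1 hi2 j hj1 hj2
      have : i = 0 := by omega
      subst this
      have : j = 0 := by omega
      subst this
      simp
    rw [hbase]
    exact ⟨⟨fun hl => ⟨hl, huni⟩, fun h => h.1⟩, fun _ => rfl⟩
  · have hn2 : 2 ≤ n := by omega
    rw [alt_step hn2]
    by_cases hc : (PySem.Str.len (mcpCell cp x y) = 1 ∧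
        (PySem.List.pyRange 0 n 1).all (fun i =>
          (PySem.List.pyRange 0 n 1).all (fun j => mcpCell cp (x + i) (y + j) == mcpCell cp x y)))
    · rw [if_pos hc]
      have := (alt_cond_iff n cp x y).1 hc
      exact ⟨⟨fun _ => this, fun _ => hc.1⟩, fun _ => rfl⟩
    · rw [if_neg hc]
      have hnc : ¬ (PySem.Str.len (mcpCell cp x y) = 1 ∧ mcpUniform cp n x y) := by
        intro h; exact hc ((alt_cond_iff n cp x y).2 h)
      exact ⟨⟨fun hl => absurd hl (paren_len_ne_one _ _ _ _), fun h => absurd h hnc⟩,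
             fun h => absurd h hnc⟩

theorem main_eq (n : Int) (cp : List (List String)) (x y : Int) (hp : mcpPow2 n) :
    making_colored_paper n cp x y = making_colored_paper_alt n cp x y := by
  have hn : 1 ≤ n := by
    obtain ⟨k, rfl⟩ := hp
    exact one_le_pow₀ (by norm_num)
  by_cases h1 : n = 1
  · subst h1
    rw [making_colored_paper, dif_pos rfl, making_colored_paper_alt, dif_pos rfl]
  · have hn2 : 2 ≤ n := by omega
    obtain ⟨hph, hdouble⟩ := mcpPow2_half hp hn2
    have hfe : PySem.Int.floordiv n 2 = n / 2 := mcpHalf n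
    have hf1 : 1 ≤ PySem.Int.floordiv n 2 := by rw [hfe]; omega
    have hlt : (PySem.Int.floordiv n 2).toNat < n.toNat := by rw [hfe]; omega
    have hph' : mcpPow2 (PySem.Int.floordiv n 2) := by rw [hfe]; exact hph
    have e1 := main_eq (PySem.Int.floordiv n 2) cp x y hph'
    have e2 := main_eq (PySem.Int.floordiv n 2) cp x (y + PySem.Int.floordiv n 2) hph'
    have e3 := main_eq (PySem.Int.floordiv n 2) cp (x + PySem.Int.floordiv n 2) y hph'
    have e4 := main_eq (PySem.Int.floordiv n 2) cp (x + PySem.Int.floordiv n 2) (y + PySem.Int.floordiv n 2) hph'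
    have hsplit := mcpUniform_split cp hf1
      (by rw [hfe]; omega : n = 2 * PySem.Int.floordiv n 2) x y
    rw [a_step hn2, alt_step hn2, e1, e2, e3, e4]
    obtain ⟨c1a, c1b⟩ := alt_char (PySem.Int.floordiv n 2) cp x y hf1
    obtain ⟨c2a, c2b⟩ := alt_char (PySem.Int.floordiv n 2) cp x (y + PySem.Int.floordiv n 2) hf1
    obtain ⟨c3a, c3b⟩ := alt_char (PySem.Int.floordiv n 2) cp (x + PySem.Int.floordiv n 2) y hf1
    obtain ⟨c4a, c4b⟩ := alt_char (PySem.Int.floordiv n 2) cp (x + PySem.Int.floordiv n 2) (y + PySem.Int.floordiv n 2) hf1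
    by_cases hca : (making_colored_paper_alt (PySem.Int.floordiv n 2) cp x y = making_colored_paper_alt (PySem.Int.floordiv n 2) cp x (y + PySem.Int.floordiv n 2) ∧
        making_colored_paper_alt (PySem.Int.floordiv n 2) cp x (y + PySem.Int.floordiv n 2) = making_colored_paper_alt (PySem.Int.floordiv n 2) cp (x + PySem.Int.floordiv n 2) y ∧
        making_colored_paper_alt (PySem.Int.floordiv n 2) cp (x + PySem.Int.floordiv n 2) y = making_colored_paper_alt (PySem.Int.floordiv n 2) cp (x + PySem.Int.floordiv n 2) (y + PySem.Int.floordiv n 2) ∧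
        PySem.Str.len (making_colored_paper_alt (PySem.Int.floordiv n 2) cp x y) = 1)
    · obtain ⟨q12, q23, q34, ql⟩ := hca
      obtain ⟨hv1, hu1⟩ := c1a.1 ql
      obtain ⟨hv2, hu2⟩ := c2a.1 (by rw [← q12]; exact ql)
      obtain ⟨hv3, hu3⟩ := c3a.1 (by rw [← q23, ← q12]; exact ql)
      obtain ⟨hv4, hu4⟩ := c4a.1 (by rw [← q34, ← q23, ← q12]; exact ql)
      have r1 := c1b ⟨hv1, hu1⟩
      have r2 := c2b ⟨hv2, hu2⟩
      have r3 := c3b ⟨hv3, hu3⟩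
      have r4 := c4b ⟨hv4, hu4⟩
      have ce2 : mcpCell cp x (y + PySem.Int.floordiv n 2) = mcpCell cp x y := by
        rw [← r2, ← q12, r1]
      have ce3 : mcpCell cp (x + PySem.Int.floordiv n 2) y = mcpCell cp x y := by
        rw [← r3, ← q23, ← q12, r1]
      have ce4 : mcpCell cp (x + PySem.Int.floordiv n 2) (y + PySem.Int.floordiv n 2) = mcpCell cp x y := by
        rw [← r4, ← q34, ← q23, ← q12, r1]
      have hun : mcpUniform cp n x y := hsplit.2 ⟨hu1, hu2, hu3, hu4, ce2, ce3, ce4⟩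
      rw [if_pos ⟨q12, q23, q34, ql⟩,
          if_pos ((alt_cond_iff n cp x y).2 ⟨hv1, hun⟩), r1]
    · rw [if_neg hca]
      by_cases hcb : (PySem.Str.len (mcpCell cp x y) = 1 ∧
          (PySem.List.pyRange 0 n 1).all (fun i =>
            (PySem.List.pyRange 0 n 1).all (fun j => mcpCell cp (x + i) (y + j) == mcpCell cp x y)))
      · exfalso
        obtain ⟨hv, hun⟩ := (alt_cond_iff n cp x y).1 hcb
        obtain ⟨hu1, hu2, hu3, hu4, ce2, ce3, ce4⟩ := hsplit.1 hun
        have r1 := c1b ⟨hv, hu1⟩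
        have r2 := c2b ⟨by rw [ce2]; exact hv, hu2⟩
        have r3 := c3b ⟨by rw [ce3]; exact hv, hu3⟩
        have r4 := c4b ⟨by rw [ce4]; exact hv, hu4⟩
        exact hca ⟨by rw [r1, r2, ce2], by rw [r2, r3, ce2, ce3], by rw [r3, r4, ce3, ce4],
                   by rw [r1]; exact hv⟩
      · rw [if_neg hcb]
termination_by n.toNat
decreasing_by all_goals exact hlt

-- ===== VERDICT (by name: the statement is the Claim_ definition above) =====
theorem making_colored_paper_spec : Claim_equal_making_colored_paper := by
  intro n cp x y _ hpre
  exact main_eq n cp x y (mcpPow2_of_mem hpre.1)
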